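-- pv_equiv track=rewrite | github.com/littlewwwhite/KnowledgeGraph-based-on-Raw-text-A27 | modules/prepare/filter.py | _find_token_position
-- ===== SOURCE A (Python) =====
-- from typing import Any, Dict, List
--
-- def _find_token_position(
--     sentence_tokens: List[str],
--     entity_tokens: List[str]
-- ) -> int:
--     """
--     Find the starting position of entity tokens within sentence tokens.
--
--     Args:
--         sentence_tokens: Tokenized sentence.
--         entity_tokens: Tokenized entity to find.
--
--     Returns:
--         Starting index if found, -1 otherwise.
--     """
--     for i in range(len(sentence_tokens) - len(entity_tokens) + 1):
--         if sentence_tokens[i:i + len(entity_tokens)] == entity_tokens: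
--             return i
--     return -1
-- ===== SOURCE B (Python) =====
-- def _find_token_position(sentence_tokens, entity_tokens):
--     m = len(entity_tokens)
--     if m == 0:
--         return 0
--     # KMP failure table: fail[i] = length of the longest proper border of entity_tokens[:i+1]
--     fail = [0]
--     k = 0
--     for i in range(1, m):
--         while k > 0 and entity_tokens[i] != entity_tokens[k]:
--             k = fail[k - 1]
--         if entity_tokens[i] == entity_tokens[k]:
--             k += 1
--         fail.append(k)
--     # KMP scan: q = length of the longest entity prefix matching a suffix of the tokens read
--     q = 0
--     for i, tok in enumerate(sentence_tokens):
--         while q > 0 and tok != entity_tokens[q]: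
--             q = fail[q - 1]
--         if tok == entity_tokens[q]:
--             q += 1
--         if q == m:
--             return i - m + 1
--     return -1
-- ===== Notes on version B (the rewrite author's own statement) =====
-- stated objective: alternative
-- what changed: Replaces A's window scan (compare a fresh slice at every start index) by KMP string matching over token lists: the classic O(m) failure-table construction plus a single left-to-right pass over the sentence that maintains the longest partial-match length and falls back along the border chain on mismatch, O(n+m) total.
import Mathlib
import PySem

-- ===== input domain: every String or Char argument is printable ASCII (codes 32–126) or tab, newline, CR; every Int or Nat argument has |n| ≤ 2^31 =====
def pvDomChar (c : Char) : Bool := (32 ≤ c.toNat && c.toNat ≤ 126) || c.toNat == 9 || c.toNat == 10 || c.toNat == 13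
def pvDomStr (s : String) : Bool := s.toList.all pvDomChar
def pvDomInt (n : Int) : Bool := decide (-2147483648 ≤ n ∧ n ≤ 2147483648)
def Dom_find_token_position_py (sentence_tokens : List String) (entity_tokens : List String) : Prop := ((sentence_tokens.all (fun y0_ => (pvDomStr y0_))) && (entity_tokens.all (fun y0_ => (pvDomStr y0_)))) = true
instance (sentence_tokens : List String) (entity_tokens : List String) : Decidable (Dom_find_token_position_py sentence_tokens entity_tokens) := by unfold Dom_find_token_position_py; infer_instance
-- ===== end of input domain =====

-- B replaces A's slice-comparison window scan by KMP matching: a precomputed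
-- border (failure) table plus a single left-to-right pass that maintains the
-- length of the longest entity prefix matching a suffix of the tokens read so
-- far (objective: alternative algorithm).

-- ===== PORT A =====
-- for i in range(len(s) - len(e) + 1): if s[i:i+len(e)] == e: return i; return -1
def find_token_position_py (sentence_tokens : List String) (entity_tokens : List String) : Int :=
  match (PySem.List.pyRange 0 ((sentence_tokens.length : Int) - (entity_tokens.length : Int) + 1) 1).find?
      (fun i => PySem.List.slice sentence_tokens (some i) (some (i + (entity_tokens.length : Int))) == entity_tokens) with
  | some i => i
  | none => -1

-- ===== PORT B =====
-- while q > 0 and tok != e[q]: q = fail[q-1]   (fuel: the chain strictly decreases, q steps suffice)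
def ftpShift (e : List String) (fail : List Nat) (tok : String) : Nat → Nat → Nat
  | 0, q => q
  | fuel + 1, q =>
    if q ≠ 0 ∧ ¬ (tok = e.getD q "") then ftpShift e fail tok fuel (fail.getD (q - 1) 0) else q

-- body of 'for i in range(1, m)': the failure-table construction step, state = (fail, k)
def ftpBuildStep (e : List String) (st : List Nat × Nat) (i : Nat) : List Nat × Nat :=
  let k1 := ftpShift e st.1 (e.getD i "") st.2 st.2
  let k2 := if e.getD i "" = e.getD k1 "" then k1 + 1 else k1
  (st.1 ++ [k2], k2)

-- fail = [0]; k = 0; for i in range(1, m): …while…; if e[i]==e[k]: k += 1; fail.append(k)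
def ftpFail (e : List String) : List Nat :=
  if e.length = 0 then [] else
    ((List.range' 1 (e.length - 1)).foldl (ftpBuildStep e) ([0], 0)).1

-- for i, tok in enumerate(s): …shift…; if tok == e[q]: q += 1; if q == m: return i - m + 1
def ftpRun (e : List String) (fail : List Nat) (m : Nat) : List String → Nat → Nat → Int
  | [], _, _ => -1
  | tok :: rest, i, q =>
    let q1 := ftpShift e fail tok q q
    let q2 := if tok = e.getD q1 "" then q1 + 1 else q1
    if q2 = m then (i : Int) - (m : Int) + 1
    else ftpRun e fail m rest (i + 1) q2

def find_token_position_py_alt (sentence_tokens : List String) (entity_tokens : List String) : Int :=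
  let m := entity_tokens.length
  if m = 0 then 0
  else ftpRun entity_tokens (ftpFail entity_tokens) m sentence_tokens 0 0

-- ===== PRECONDITION & SPEC =====
def Spec_find_token_position_py (sentence_tokens : List String) (entity_tokens : List String) (out : Int) : Prop := out = find_token_position_py_alt sentence_tokens entity_tokens
instance (sentence_tokens : List String) (entity_tokens : List String) (out : Int) : Decidable (Spec_find_token_position_py sentence_tokens entity_tokens out) := by unfold Spec_find_token_position_py; infer_instance

-- ===== CLAIM (what is proved, stated in full; the proofs are below) =====
def Claim_equal_find_token_position_py : Prop := ∀ (sentence_tokens : List String) (entity_tokens : List String), Dom_find_token_position_py sentence_tokens entity_tokens → Spec_find_token_position_py sentence_tokens entity_tokens (find_token_position_py sentence_tokens entity_tokens)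

-- ===== LEMMAS AND PROOFS =====

-- reference predicate for A: "the entity matches at start position j"
def pvMatchAt (s e : List String) (j : Nat) : Bool :=
  decide (∀ k < e.length, s[j + k]? = e[k]?)

-- F p = length of the longest prefix of e that is a suffix of p
def pvF (e p : List String) : Nat := Nat.findGreatest (fun k => e.take k <:+ p) e.length

-- T a q = what the while-loop computes from state q on token a
def pvT (e : List String) (a : String) (q : Nat) : Nat :=
  Nat.findGreatest (fun k => e.take k <:+ e.take q ∧ (k = 0 ∨ a = e.getD k "")) q

-- BT i = length of the longest proper border of e.take (i+1)  (the failure-table value)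
def pvBT (e : List String) (i : Nat) : Nat :=
  Nat.findGreatest (fun k => e.take k <:+ e.take (i + 1)) i

theorem take_drop_eq_iff (s e : List String) (j : Nat) :
    ((s.drop j).take e.length = e) ↔ (∀ k < e.length, s[j + k]? = e[k]?) := by
  constructor
  · intro h k hk
    have := congrArg (fun l => l[k]?) h
    simpa [List.getElem?_take, List.getElem?_drop, hk] using this
  · intro h
    apply List.ext_getElem?
    intro k
    by_cases hk : k < e.length
    · simpa [List.getElem?_take, List.getElem?_drop, hk] using h k hk
    · simp [hk]

theorem pvMatchAt_iff (s e : List String) (j : Nat) :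
    pvMatchAt s e j = true ↔ (s.drop j).take e.length = e := by
  rw [pvMatchAt, decide_eq_true_eq]
  exact (take_drop_eq_iff s e j).symm

theorem pvMatchAt_bound (s e : List String) (j : Nat)
    (he : 0 < e.length) (h : pvMatchAt s e j = true) : j + e.length ≤ s.length := by
  have h' := of_decide_eq_true h
  have hk := h' (e.length - 1) (by omega)
  by_contra hc
  rw [List.getElem?_eq_none (by omega : s.length ≤ j + (e.length - 1))] at hk
  rw [List.getElem?_eq_getElem (by omega : e.length - 1 < e.length)] at hk
  simp at hk

-- A's per-index test equals pvMatchAt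
theorem predA_eq (s e : List String) (j : Nat) :
    (PySem.List.slice s (some (j : Int)) (some ((j : Int) + (e.length : Int))) == e)
      = pvMatchAt s e j := by
  rw [PySem.List.slice_natCast_add]
  rw [Bool.eq_iff_iff]
  simp only [beq_iff_eq, pvMatchAt, decide_eq_true_eq]
  exact take_drop_eq_iff s e j

theorem find?_range_prefix (p : Nat → Bool) (a b : Nat) (hab : a ≤ b)
    (h : ∀ j, p j = true → j < a) :
    (List.range b).find? p = (List.range a).find? p := by
  have hb : b = a + (b - a) := by omega
  rw [hb, List.range_add, List.find?_append]
  have hnone : (List.map (a + ·) (List.range (b - a))).find? p = none := by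
    rw [List.find?_eq_none]
    intro x hx
    simp only [List.mem_map, List.mem_range] at hx
    obtain ⟨k, _, rfl⟩ := hx
    intro hp
    have := h _ hp
    omega
  simp [hnone]

-- ---- basic facts about suffixes of takes ----

theorem suffix_snoc_iff (l1 l2 : List String) (x y : String) :
    (l1 ++ [x] <:+ l2 ++ [y]) ↔ (x = y ∧ l1 <:+ l2) := by
  constructor
  · rintro ⟨t, ht⟩
    rw [← List.append_assoc] at ht
    obtain ⟨h1, h2⟩ := List.append_inj' ht (by simp)
    obtain rfl := List.singleton_injective h2 |>.symm
    exact ⟨rfl, ⟨t, h1⟩⟩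
  · rintro ⟨rfl, ⟨t, ht⟩⟩
    exact ⟨t, by rw [← List.append_assoc, ht]⟩

theorem take_succ_getD (e : List String) (r : Nat) (hr : r < e.length) :
    e.take (r + 1) = e.take r ++ [e.getD r ""] := by
  rw [List.take_add_one, List.getD_eq_getElem?_getD]
  rw [List.getElem?_eq_getElem hr]
  rfl

-- ---- fail table ----

-- ---- the while loop computes pvT ----

theorem ftpShift_eq (e : List String) (fail : List Nat) (a : String) :
    ∀ fuel q, q ≤ fuel → q ≤ e.length → (∀ n, n + 1 ≤ q → fail.getD n 0 = pvBT e n) →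
      ftpShift e fail a fuel q = pvT e a q := by
  intro fuel
  induction fuel with
  | zero =>
    intro q hq _ _
    have hq0 : q = 0 := by omega
    subst hq0
    simp [ftpShift, pvT]
  | succ fuel ih =>
    intro q hq hqe htab
    rw [ftpShift]
    by_cases hcond : q ≠ 0 ∧ ¬ (a = e.getD q "")
    · rw [if_pos hcond]
      obtain ⟨hq0, hne⟩ := hcond
      obtain ⟨n, rfl⟩ : ∃ n, q = n + 1 := ⟨q - 1, by omega⟩
      have hsimp : n + 1 - 1 = n := rfl
      rw [hsimp, htab n (le_refl _), pvBT]
      set fl := Nat.findGreatest (fun k => e.take k <:+ e.take (n + 1)) n with hfl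
      have hfl_le : fl ≤ n := Nat.findGreatest_le _
      have hfl_suf : e.take fl <:+ e.take (n + 1) := by
        rcases Nat.eq_zero_or_pos fl with h0 | h0
        · rw [h0]; simp
        · exact Nat.findGreatest_of_ne_zero hfl.symm h0.ne'
      have hset : ∀ k, k ≤ n →
          ((e.take k <:+ e.take (n + 1)) ↔ (k ≤ fl ∧ e.take k <:+ e.take fl)) := by
        intro k hk
        constructor
        · intro h
          have h1 : k ≤ fl := Nat.le_findGreatest hk h
          refine ⟨h1, List.suffix_of_suffix_length_le h hfl_suf ?_⟩
          rw [List.length_take, List.length_take]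
          omega
        · rintro ⟨-, h⟩
          exact h.trans hfl_suf
      rw [ih fl (by omega) (by omega) (fun n' hn' => htab n' (by omega))]
      rw [pvT, pvT, Nat.findGreatest_succ]
      rw [if_neg (fun hP => hP.2.elim (fun h0 => by omega) (fun ha => hne ha))]
      apply le_antisymm
      · rcases Nat.eq_zero_or_pos (Nat.findGreatest
            (fun k => e.take k <:+ e.take fl ∧ (k = 0 ∨ a = e.getD k "")) fl) with h0 | h0
        · rw [h0]; exact Nat.zero_le _
        · have hP := Nat.findGreatest_of_ne_zero
            (P := fun k => e.take k <:+ e.take fl ∧ (k = 0 ∨ a = e.getD k "")) rfl h0.ne'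
          have hle := Nat.findGreatest_le
            (P := fun k => e.take k <:+ e.take fl ∧ (k = 0 ∨ a = e.getD k "")) fl
          obtain ⟨hsf, hd⟩ := hP
          exact Nat.le_findGreatest (by omega) ⟨hsf.trans hfl_suf, hd⟩
      · rcases Nat.eq_zero_or_pos (Nat.findGreatest
            (fun k => e.take k <:+ e.take (n + 1) ∧ (k = 0 ∨ a = e.getD k "")) n) with h0 | h0
        · rw [h0]; exact Nat.zero_le _
        · have hP := Nat.findGreatest_of_ne_zero
            (P := fun k => e.take k <:+ e.take (n + 1) ∧ (k = 0 ∨ a = e.getD k "")) rfl h0.ne'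
          have hle := Nat.findGreatest_le
            (P := fun k => e.take k <:+ e.take (n + 1) ∧ (k = 0 ∨ a = e.getD k "")) n
          obtain ⟨hsf, hd⟩ := hP
          obtain ⟨h1, h2⟩ := (hset _ hle).mp hsf
          exact Nat.le_findGreatest h1 ⟨h2, hd⟩
    · rw [if_neg hcond]
      have hd : q = 0 ∨ a = e.getD q "" := by tauto
      exact (Nat.findGreatest_eq ⟨List.suffix_refl _, hd⟩).symm

-- ---- pvF facts ----

theorem pvF_le (e p : List String) : pvF e p ≤ e.length := Nat.findGreatest_le _

theorem pvF_suffix (e p : List String) : e.take (pvF e p) <:+ p := by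
  rw [pvF]
  rcases Nat.eq_zero_or_pos (Nat.findGreatest (fun k => e.take k <:+ p) e.length) with h | h
  · rw [h]; simp
  · exact Nat.findGreatest_of_ne_zero rfl h.ne'

theorem pvF_ge (e p : List String) (k : Nat) (hk : k ≤ e.length) (h : e.take k <:+ p) :
    k ≤ pvF e p := Nat.le_findGreatest hk h

theorem pvF_bridge (e p : List String) (k : Nat) (hk : k ≤ pvF e p) :
    (e.take k <:+ p) ↔ e.take k <:+ e.take (pvF e p) := by
  constructor
  · intro h
    refine List.suffix_of_suffix_length_le h (pvF_suffix e p) ?_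
    rw [List.length_take, List.length_take]
    have h2 := pvF_le e p
    omega
  · intro h
    exact h.trans (pvF_suffix e p)

theorem pvF_nil (e : List String) : pvF e [] = 0 := by
  rw [pvF, Nat.findGreatest_eq_zero_iff]
  intro n hn hne h
  rw [List.suffix_nil] at h
  have hl : (e.take n).length = n := by rw [List.length_take]; omega
  rw [h] at hl
  simp at hl; omega

theorem pvF_eq_len_iff (e p : List String) (he : e ≠ []) :
    pvF e p = e.length ↔ e <:+ p := by
  have hne : e.length ≠ 0 := by simpa using he
  constructor
  · intro h
    have := pvF_suffix e p
    rw [h, List.take_length] at this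
    exact this
  · intro h
    have h1 : e.length ≤ pvF e p :=
      Nat.le_findGreatest (le_refl _) (by rw [List.take_length]; exact h)
    have h2 := pvF_le e p
    omega

theorem take_snoc_suffix_iff (e p : List String) (a : String) (g : Nat) (hg : g < e.length) :
    (e.take (g + 1) <:+ p ++ [a]) ↔ (e.getD g "" = a ∧ e.take g <:+ p) := by
  rw [take_succ_getD e g hg, suffix_snoc_iff]

theorem pvF_append (e p : List String) (a : String) (hq : pvF e p < e.length) :
    pvF e (p ++ [a]) =
      (if a = e.getD (pvT e a (pvF e p)) "" then pvT e a (pvF e p) + 1 else pvT e a (pvF e p)) := by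
  have hr_le : pvT e a (pvF e p) ≤ pvF e p := Nat.findGreatest_le _
  have hrP : e.take (pvT e a (pvF e p)) <:+ e.take (pvF e p) ∧
      (pvT e a (pvF e p) = 0 ∨ a = e.getD (pvT e a (pvF e p)) "") := by
    rcases Nat.eq_zero_or_pos (pvT e a (pvF e p)) with h0 | h0
    · rw [h0]; exact ⟨by simp, Or.inl rfl⟩
    · exact Nat.findGreatest_of_ne_zero (n := pvF e p) rfl h0.ne'
  by_cases hra : a = e.getD (pvT e a (pvF e p)) ""
  · rw [if_pos hra]
    apply le_antisymm
    · rcases Nat.eq_zero_or_pos (pvF e (p ++ [a])) with h0 | h0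
      · omega
      · obtain ⟨g, hgFA⟩ : ∃ g, pvF e (p ++ [a]) = g + 1 := ⟨pvF e (p ++ [a]) - 1, by omega⟩
        have hFA_le : pvF e (p ++ [a]) ≤ e.length := pvF_le _ _
        have hP : e.take (pvF e (p ++ [a])) <:+ p ++ [a] := pvF_suffix e (p ++ [a])
        rw [hgFA] at hP hFA_le
        obtain ⟨hga, hgp⟩ := (take_snoc_suffix_iff e p a g (by omega)).mp hP
        have hgq0 : g ≤ pvF e p := pvF_ge e p g (by omega) hgp
        have hgr : g ≤ pvT e a (pvF e p) :=
          Nat.le_findGreatest hgq0 ⟨(pvF_bridge e p g hgq0).mp hgp, Or.inr hga.symm⟩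
        omega
    · apply Nat.le_findGreatest (by omega)
      refine (take_snoc_suffix_iff e p a (pvT e a (pvF e p)) (by omega)).mpr ⟨hra.symm, ?_⟩
      exact (pvF_bridge e p _ hr_le).mpr hrP.1
  · rw [if_neg hra]
    have hr0 : pvT e a (pvF e p) = 0 := by tauto
    rw [hr0]
    rw [pvF, Nat.findGreatest_eq_zero_iff]
    intro nn hnn hnnl h
    obtain ⟨g, rfl⟩ : ∃ g, nn = g + 1 := ⟨nn - 1, by omega⟩
    obtain ⟨hga, hgp⟩ := (take_snoc_suffix_iff e p a g (by omega)).mp h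
    have hgq0 : g ≤ pvF e p := pvF_ge e p g (by omega) hgp
    have hgr : g ≤ pvT e a (pvF e p) :=
      Nat.le_findGreatest hgq0 ⟨(pvF_bridge e p g hgq0).mp hgp, Or.inr hga.symm⟩
    rw [hr0] at hgr
    have hg0 : g = 0 := by omega
    rw [hg0] at hga
    rw [hr0] at hra
    exact hra hga.symm

-- ---- the main scan ----

-- ---- failure-table construction is correct ----

theorem pvBT_zero (e : List String) : pvBT e 0 = 0 := rfl

theorem pvBT_le (e : List String) (i : Nat) : pvBT e i ≤ i := Nat.findGreatest_le _

theorem pvBT_suffix (e : List String) (i : Nat) : e.take (pvBT e i) <:+ e.take (i + 1) := by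
  rw [pvBT]
  rcases Nat.eq_zero_or_pos (Nat.findGreatest (fun k => e.take k <:+ e.take (i + 1)) i) with h | h
  · rw [h]; simp
  · exact Nat.findGreatest_of_ne_zero rfl h.ne'

theorem pvBT_suffix' (e : List String) (i : Nat) (hi : 1 ≤ i) :
    e.take (pvBT e (i - 1)) <:+ e.take i := by
  have := pvBT_suffix e (i - 1)
  rwa [show i - 1 + 1 = i from by omega] at this

theorem pvBT_bridge (e : List String) (i k : Nat) (hi : 1 ≤ i) (_hil : i ≤ e.length)
    (hk : k ≤ pvBT e (i - 1)) :
    (e.take k <:+ e.take i) ↔ e.take k <:+ e.take (pvBT e (i - 1)) := by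
  have hq0 : pvBT e (i - 1) ≤ i - 1 := pvBT_le e (i - 1)
  constructor
  · intro h
    refine List.suffix_of_suffix_length_le h (pvBT_suffix' e i hi) ?_
    rw [List.length_take, List.length_take]
    omega
  · intro h
    exact h.trans (pvBT_suffix' e i hi)

theorem pvBT_ge (e : List String) (i k : Nat) (hi : 1 ≤ i) (hk : k ≤ i - 1)
    (h : e.take k <:+ e.take i) : k ≤ pvBT e (i - 1) := by
  apply Nat.le_findGreatest hk
  rwa [show i - 1 + 1 = i from by omega]

theorem pvBT_succ (e : List String) (i : Nat) (hi : 1 ≤ i) (hil : i < e.length) :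
    pvBT e i =
      (if e.getD i "" = e.getD (pvT e (e.getD i "") (pvBT e (i - 1))) "" then
        pvT e (e.getD i "") (pvBT e (i - 1)) + 1
      else pvT e (e.getD i "") (pvBT e (i - 1))) := by
  have hq0_le : pvBT e (i - 1) ≤ i - 1 := pvBT_le e (i - 1)
  have hr_le : pvT e (e.getD i "") (pvBT e (i - 1)) ≤ pvBT e (i - 1) := Nat.findGreatest_le _
  have hrP : e.take (pvT e (e.getD i "") (pvBT e (i - 1))) <:+ e.take (pvBT e (i - 1)) ∧
      (pvT e (e.getD i "") (pvBT e (i - 1)) = 0 ∨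
        e.getD i "" = e.getD (pvT e (e.getD i "") (pvBT e (i - 1))) "") := by
    rcases Nat.eq_zero_or_pos (pvT e (e.getD i "") (pvBT e (i - 1))) with h0 | h0
    · rw [h0]; exact ⟨by simp, Or.inl rfl⟩
    · exact Nat.findGreatest_of_ne_zero (n := pvBT e (i - 1)) rfl h0.ne'
  have hdec : ∀ g, g < e.length →
      ((e.take (g + 1) <:+ e.take (i + 1)) ↔ (e.getD g "" = e.getD i "" ∧ e.take g <:+ e.take i)) := by
    intro g hg
    rw [take_succ_getD e i hil, take_succ_getD e g hg, suffix_snoc_iff]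
  by_cases hra : e.getD i "" = e.getD (pvT e (e.getD i "") (pvBT e (i - 1))) ""
  · rw [if_pos hra]
    apply le_antisymm
    · rcases Nat.eq_zero_or_pos (pvBT e i) with h0 | h0
      · omega
      · obtain ⟨g, hgBT⟩ : ∃ g, pvBT e i = g + 1 := ⟨pvBT e i - 1, by omega⟩
        have hble : pvBT e i ≤ i := pvBT_le e i
        have hsuf := pvBT_suffix e i
        rw [hgBT] at hble hsuf
        obtain ⟨hga, hgp⟩ := (hdec g (by omega)).mp hsuf
        have hgq0 : g ≤ pvBT e (i - 1) := pvBT_ge e i g hi (by omega) hgp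
        have hgr : g ≤ pvT e (e.getD i "") (pvBT e (i - 1)) :=
          Nat.le_findGreatest hgq0
            ⟨(pvBT_bridge e i g hi (by omega) hgq0).mp hgp, Or.inr hga.symm⟩
        omega
    · apply Nat.le_findGreatest (by omega)
      refine (hdec _ (by omega)).mpr ⟨hra.symm, ?_⟩
      exact (pvBT_bridge e i _ hi (by omega) hr_le).mpr hrP.1
  · rw [if_neg hra]
    have hr0 : pvT e (e.getD i "") (pvBT e (i - 1)) = 0 := by tauto
    rw [hr0]
    rw [pvBT, Nat.findGreatest_eq_zero_iff]
    intro nn hnn hnnl h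
    obtain ⟨g, rfl⟩ : ∃ g, nn = g + 1 := ⟨nn - 1, by omega⟩
    obtain ⟨hga, hgp⟩ := (hdec g (by omega)).mp h
    have hgq0 : g ≤ pvBT e (i - 1) := pvBT_ge e i g hi (by omega) hgp
    have hgr : g ≤ pvT e (e.getD i "") (pvBT e (i - 1)) :=
      Nat.le_findGreatest hgq0
        ⟨(pvBT_bridge e i g hi (by omega) hgq0).mp hgp, Or.inr hga.symm⟩
    rw [hr0] at hgr
    have hg0 : g = 0 := by omega
    rw [hg0] at hga
    rw [hr0] at hra
    exact hra hga.symm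

theorem getD_map_range (f : Nat → Nat) (n i : Nat) (hi : i < n) :
    ((List.range n).map f).getD i 0 = f i := by
  rw [List.getD_eq_getElem?_getD, List.getElem?_map, List.getElem?_range hi]
  rfl

theorem build_inv (e : List String) :
    ∀ (steps i : Nat), 1 ≤ i → i + steps ≤ e.length →
      (List.range' i steps).foldl (ftpBuildStep e) ((List.range i).map (pvBT e), pvBT e (i - 1))
        = ((List.range (i + steps)).map (pvBT e), pvBT e (i + steps - 1)) := by
  intro steps
  induction steps with
  | zero => intro i _ _; simp
  | succ steps ih =>
    intro i hi hle
    rw [List.range'_succ, List.foldl_cons]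
    have hstep : ftpBuildStep e ((List.range i).map (pvBT e), pvBT e (i - 1)) i
        = ((List.range (i + 1)).map (pvBT e), pvBT e i) := by
      unfold ftpBuildStep
      have hsh : ftpShift e ((List.range i).map (pvBT e)) (e.getD i "")
            (pvBT e (i - 1)) (pvBT e (i - 1)) = pvT e (e.getD i "") (pvBT e (i - 1)) := by
        apply ftpShift_eq e _ _ _ _ (le_refl _) (by have := pvBT_le e (i - 1); omega)
        intro n hn
        have hni : n < i := by have := pvBT_le e (i - 1); omega
        exact getD_map_range (pvBT e) i n hni
      simp only [hsh]
      rw [← pvBT_succ e i hi (by omega)]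
      rw [List.range_succ, List.map_append]
      simp
    rw [hstep]
    have := ih (i + 1) (by omega) (by omega)
    rw [show i + 1 + steps = i + (steps + 1) from by omega] at this
    rw [show i + 1 - 1 = i from by omega] at this
    exact this

theorem ftpFail_getD (e : List String) (n : Nat) (hn : n < e.length) :
    (ftpFail e).getD n 0 = pvBT e n := by
  unfold ftpFail
  rw [if_neg (by omega)]
  have hinit : ((List.range 1).map (pvBT e), pvBT e (1 - 1)) = (([0], 0) : List Nat × Nat) := by
    simp [pvBT_zero]
  have h := build_inv e (e.length - 1) 1 (le_refl _) (by omega)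
  rw [hinit] at h
  rw [show 1 + (e.length - 1) = e.length from by omega] at h
  rw [h]
  exact getD_map_range (pvBT e) e.length n hn

theorem drop_cons_take (s rest' : List String) (a : String) (i : Nat)
    (h : s.drop i = a :: rest') :
    s.take (i + 1) = s.take i ++ [a] ∧ s.drop (i + 1) = rest' := by
  constructor
  · rw [List.take_add, h]
    rfl
  · rw [← List.drop_drop, h]
    rfl

theorem run_spec (s e : List String) (he : e ≠ []) :
    ∀ (rest : List String) (i q : Nat), s.drop i = rest → q = pvF e (s.take i) → q < e.length →
      ftpRun e (ftpFail e) e.length rest i q =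
        (match (List.range' (i + 1) rest.length).find? (fun j => decide (e <:+ s.take j)) with
          | some j => (j : Int) - (e.length : Int)
          | none => -1) := by
  intro rest
  induction rest with
  | nil =>
    intro i q _ _ _
    simp [ftpRun]
  | cons a rest' ih =>
    intro i q hdrop hq hqlt
    obtain ⟨htake1, hdrop1⟩ := drop_cons_take s rest' a i hdrop
    simp only [ftpRun]
    rw [ftpShift_eq e (ftpFail e) a q q (le_refl q) hqlt.le
      (fun n hn => ftpFail_getD e n (by omega))]
    have hQ2 : (if a = e.getD (pvT e a q) "" then pvT e a q + 1 else pvT e a q)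
        = pvF e (s.take (i + 1)) := by
      rw [htake1, hq, pvF_append e (s.take i) a (by rw [← hq]; exact hqlt)]
    rw [hQ2]
    rw [List.length_cons, List.range'_succ, List.find?_cons]
    by_cases hfull : pvF e (s.take (i + 1)) = e.length
    · have hsuf : e <:+ s.take (i + 1) := (pvF_eq_len_iff e _ he).mp hfull
      rw [if_pos hfull]
      rw [decide_eq_true hsuf]
      push_cast
      ring
    · have hnsuf : ¬ (e <:+ s.take (i + 1)) := fun hc => hfull ((pvF_eq_len_iff e _ he).mpr hc)
      rw [if_neg hfull]
      rw [decide_eq_false hnsuf]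
      have hlt : pvF e (s.take (i + 1)) < e.length :=
        lt_of_le_of_ne (pvF_le e _) hfull
      have := ih (i + 1) (pvF e (s.take (i + 1))) hdrop1 rfl hlt
      rw [this]

-- ---- find? over ranges: minimal-element characterizations ----

theorem find?_range'_some (p : Nat → Bool) :
    ∀ (n a j : Nat), ((List.range' a n).find? p = some j) ↔
      (p j = true ∧ a ≤ j ∧ j < a + n ∧ ∀ k, a ≤ k → k < j → ¬ p k = true) := by
  intro n
  induction n with
  | zero =>
    intro a j
    constructor
    · intro h; simp at h
    · rintro ⟨_, h1, h2, _⟩; omega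
  | succ n ih =>
    intro a j
    rw [List.range'_succ, List.find?_cons]
    cases hpa : p a
    · rw [ih (a + 1) j]
      constructor
      · rintro ⟨hpj, h1, h2, hmin⟩
        refine ⟨hpj, by omega, by omega, fun k hk1 hk2 => ?_⟩
        rcases Nat.eq_or_lt_of_le hk1 with rfl | hk
        · rw [hpa]; exact Bool.false_ne_true
        · exact hmin k (by omega) hk2
      · rintro ⟨hpj, h1, h2, hmin⟩
        have hja : j ≠ a := fun hja => by rw [hja, hpa] at hpj; exact Bool.false_ne_true hpj
        exact ⟨hpj, by omega, by omega, fun k hk1 hk2 => hmin k (by omega) hk2⟩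
    · constructor
      · intro h
        obtain rfl : a = j := Option.some_injective _ h
        exact ⟨hpa, le_refl _, by omega, fun k hk1 hk2 => by omega⟩
      · rintro ⟨hpj, h1, h2, hmin⟩
        have hja : j = a := by
          by_contra hne
          exact hmin a (le_refl _) (by omega) hpa
        rw [hja]

-- ---- bridge: first end-position search = first start-position search ----

theorem end_to_start (s e : List String) (he : e ≠ []) (j : Nat)
    (hj : j ≤ s.length) (hend : e <:+ s.take j) :
    e.length ≤ j ∧ pvMatchAt s e (j - e.length) = true := by
  have hm : 0 < e.length := List.length_pos_iff.mpr he
  have hjtl : (s.take j).length = j := by rw [List.length_take]; omega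
  have hmj : e.length ≤ j := by
    have := hend.length_le
    omega
  have heq : e = (s.take j).drop (j - e.length) := by
    have := List.suffix_iff_eq_drop.mp hend
    rw [hjtl] at this
    exact this
  rw [List.drop_take] at heq
  have hjm : j - (j - e.length) = e.length := by omega
  rw [hjm] at heq
  exact ⟨hmj, (pvMatchAt_iff s e (j - e.length)).mpr heq.symm⟩

theorem start_to_end (s e : List String) (he : e ≠ []) (i : Nat)
    (hstart : pvMatchAt s e i = true) :
    i + e.length ≤ s.length ∧ e <:+ s.take (i + e.length) := by
  have hm : 0 < e.length := List.length_pos_iff.mpr he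
  have heq : (s.drop i).take e.length = e := (pvMatchAt_iff s e i).mp hstart
  have hlen : i + e.length ≤ s.length := by
    have := congrArg List.length heq
    rw [List.length_take, List.length_drop] at this
    omega
  refine ⟨hlen, ?_⟩
  rw [List.take_add, heq]
  exact ⟨s.take i, rfl⟩

theorem end_start_bridge (s e : List String) (he : e ≠ []) :
    (match (List.range' 1 s.length).find? (fun j => decide (e <:+ s.take j)) with
      | some j => (j : Int) - (e.length : Int)
      | none => -1)
    = (match ((List.range s.length).find? (pvMatchAt s e)).map (fun k : Nat => (k : Int)) with
        | some i => i
        | none => -1) := by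
  have hm : 0 < e.length := List.length_pos_iff.mpr he
  cases hA : (List.range s.length).find? (pvMatchAt s e) with
  | none =>
    have hnone := List.find?_eq_none.mp hA
    have hBnone : (List.range' 1 s.length).find? (fun j => decide (e <:+ s.take j)) = none := by
      rw [List.find?_eq_none]
      intro j hj
      rw [List.mem_range'_1] at hj
      intro hd
      have hend := of_decide_eq_true hd
      obtain ⟨hmj, hmatch⟩ := end_to_start s e he j (by omega) hend
      have hjlt : j - e.length < s.length := by omega
      exact absurd hmatch (hnone _ (List.mem_range.mpr hjlt))
    rw [hBnone]
    rfl
  | some i =>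
    rw [List.range_eq_range'] at hA
    obtain ⟨hpi, _, hin, hmin⟩ := (find?_range'_some (pvMatchAt s e) s.length 0 i).mp hA
    obtain ⟨hlen, hend⟩ := start_to_end s e he i hpi
    have hBsome : (List.range' 1 s.length).find? (fun j => decide (e <:+ s.take j))
        = some (i + e.length) := by
      rw [find?_range'_some]
      refine ⟨decide_eq_true hend, by omega, by omega, fun k hk1 hk2 => ?_⟩
      intro hd
      have hendk := of_decide_eq_true hd
      obtain ⟨hmk, hmatch⟩ := end_to_start s e he k (by omega) hendk
      exact hmin (k - e.length) (by omega) (by omega) hmatch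
    rw [hBsome]
    simp only [Option.map_some]
    push_cast
    ring

-- ---- main equivalence ----

theorem main_eq (s e : List String) :
    find_token_position_py s e = find_token_position_py_alt s e := by
  by_cases he : e = []
  · subst he
    unfold find_token_position_py find_token_position_py_alt
    have hpos : (0 : Int) < (s.length : Int) - (([] : List String).length : Int) + 1 := by
      have : (0 : Int) ≤ (s.length : Int) := Int.natCast_nonneg _
      simp
    rw [PySem.List.pyRange_one_cons hpos]
    rw [List.find?_cons_of_pos (by simp [PySem.List.slice_to])]
    simp
  · have hm : 0 < e.length := List.length_pos_iff.mpr he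
    -- reduce A to a find? over List.range with pvMatchAt
    have hA : find_token_position_py s e =
        (match ((List.range ((s.length : Int) - (e.length : Int) + 1).toNat).find?
            (pvMatchAt s e)).map (fun k : Nat => (k : Int)) with
          | some i => i | none => -1) := by
      unfold find_token_position_py
      rw [PySem.List.pyRange_one, List.find?_map]
      have h2 : ((fun i : Int =>
            PySem.List.slice s (some i) (some (i + (e.length : Int))) == e) ∘
            (fun k : Nat => (0 : Int) + (k : Int))) = pvMatchAt s e := by
        funext k
        show (PySem.List.slice s (some ((0 : Int) + (k : Int)))
            (some (((0 : Int) + (k : Int)) + (e.length : Int))) == e) = _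
        rw [show (0 : Int) + (k : Int) = ((k : Nat) : Int) by ring]
        exact predA_eq s e k
      rw [h2]
      simp only [zero_add, sub_zero]
    have hstep : (List.range s.length).find? (pvMatchAt s e) =
        (List.range ((s.length : Int) - (e.length : Int) + 1).toNat).find? (pvMatchAt s e) := by
      apply find?_range_prefix _ _ _ ?_ ?_
      · omega
      · intro j hj
        have := pvMatchAt_bound s e j hm hj
        omega
    have hB : find_token_position_py_alt s e =
        (match (List.range' 1 s.length).find? (fun j => decide (e <:+ s.take j)) with
          | some j => (j : Int) - (e.length : Int)
          | none => -1) := by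
      have h0 : e.length ≠ 0 := by simpa using he
      simp only [find_token_position_py_alt]
      rw [if_neg h0]
      have := run_spec s e he s 0 0 (by simp) (by rw [List.take_zero, pvF_nil]) (by omega)
      simpa using this
    rw [hA, ← hstep, hB]
    exact (end_start_bridge s e he).symm

-- ===== VERDICT (by name: the statement is the Claim_ definition above) =====
theorem find_token_position_py_spec : Claim_equal_find_token_position_py := by
  intro s e _
  unfold Spec_find_token_position_py
  exact main_eq s e
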